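-- pv_equiv track=rewrite | github.com/22310230A/IA_P2 | Lógica/Lógica Proposicional/0002_Base_De_Conocimiento.py | consultar
-- ===== SOURCE A (Python) =====
-- hechos = {
--     'es_humano(alejandro)': True,
--     'es_mortal(X)': 'es_humano(X)'
-- }
--
-- def consultar(consulta):
--     if consulta in hechos and hechos[consulta] == True:
--         return True
--     elif consulta in hechos and isinstance(hechos[consulta], str):
--         regla = hechos[consulta]
--         variable = consulta.split('(')[1].split(')')[0]
--         regla_instanciada = regla.replace('X', variable)
--         return consultar(regla_instanciada)
--     else:
--         return False
-- ===== SOURCE B (Python) =====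
-- hechos = {
--     'es_humano(alejandro)': True,
--     'es_mortal(X)': 'es_humano(X)'
-- }
--
-- def _paso(consulta):
--     """One resolution step: ('done', bool) when the query is settled,
--     ('next', new_query) when a rule must be followed."""
--     valor = hechos.get(consulta)
--     if valor is True:
--         return ('done', True)
--     if isinstance(valor, str):
--         variable = consulta.split('(')[1].split(')')[0]
--         return ('next', valor.replace('X', variable))
--     return ('done', False)
--
-- def consultar(consulta):
--     while True:
--         etiqueta, valor = _paso(consulta)
--         if etiqueta == 'done':
--             return valor
--         consulta = valor
-- ===== Notes on version B (the rewrite author's own statement) =====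
-- stated objective: alternative
-- what changed: Replaced the self-recursive function with an iterative driver loop over a separate single-step function _paso that returns ('done', bool) or ('next', new_query), maintaining only the current query string.
import Mathlib
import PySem

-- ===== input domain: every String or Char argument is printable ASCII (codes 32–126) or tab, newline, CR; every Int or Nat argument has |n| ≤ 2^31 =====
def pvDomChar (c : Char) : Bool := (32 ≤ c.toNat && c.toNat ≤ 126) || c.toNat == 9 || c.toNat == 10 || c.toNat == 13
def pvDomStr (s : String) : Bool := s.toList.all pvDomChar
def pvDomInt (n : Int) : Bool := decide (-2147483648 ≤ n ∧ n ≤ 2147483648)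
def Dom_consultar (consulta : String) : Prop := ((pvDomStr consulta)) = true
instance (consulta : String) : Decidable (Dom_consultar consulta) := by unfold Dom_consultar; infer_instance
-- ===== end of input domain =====

-- B replaces A's self-recursion by an iterative driver looping over a one-step function (alternative decomposition).

-- ===== PORT A =====
-- the module-level dict: values are True (Sum.inl true) or a rule string (Sum.inr r)
def hechos : PySem.Dict String (Bool ⊕ String) :=
  PySem.Dict.ofList [("es_humano(alejandro)", Sum.inl true), ("es_mortal(X)", Sum.inr "es_humano(X)")]

-- closed form of lookup in the fixed two-entry dict (needed by the ports' termination proofs)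
theorem hechos_get? (c : String) : hechos.get? c =
    if "es_humano(alejandro)" = c then some (Sum.inl true)
    else if "es_mortal(X)" = c then some (Sum.inr "es_humano(X)") else none := by
  rw [show hechos = PySem.Dict.mk [("es_humano(alejandro)", Sum.inl true), ("es_mortal(X)", Sum.inr "es_humano(X)")] from by decide,
      PySem.Dict.get?_mk_cons, PySem.Dict.get?_mk_cons]
  simp [PySem.Dict.get?]

-- a lookup yields a rule string only at the key "es_mortal(X)" (needed by consultar's termination proof)
theorem hechos_rule (c : String) (r : String)
    (h : hechos.get? c = some (Sum.inr r)) : c = "es_mortal(X)" ∧ r = "es_humano(X)" := by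
  rw [hechos_get?] at h
  split_ifs at h with hc1 hc2
  · simp at h
  · simp at h
    exact ⟨hc2.symm, h.symm⟩

-- termination measure: the substitution chain of the fixed dict has length ≤ 1
def pvMu (s : String) : Nat := if s = "es_mortal(X)" then 1 else 0

def consultar (consulta : String) : Bool :=
  match hA : hechos.get? consulta with
  | some (Sum.inl true) => true        -- consulta in hechos and hechos[consulta] == True
  | some (Sum.inr regla) =>            -- consulta in hechos and isinstance(hechos[consulta], str)
      match hs1 : PySem.Str.split? consulta "(" with
      | none => false                  -- unreachable: the separator "(" is nonempty
      | some partes1 =>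
        match hg1 : PySem.List.pyGet? partes1 1 with
        | none => false                -- unreachable: Python IndexError (the only rule key contains '(')
        | some parte =>
          match hs2 : PySem.Str.split? parte ")" with
          | none => false              -- unreachable: the separator ")" is nonempty
          | some partes2 =>
            match hg2 : PySem.List.pyGet? partes2 0 with
            | none => false            -- unreachable: split never yields an empty list
            | some var => consultar (PySem.Str.replace regla "X" var)
  | _ => false
termination_by pvMu consulta
decreasing_by
  obtain ⟨hc, hr⟩ := hechos_rule _ _ hA
  subst hc; subst hr
  rw [show PySem.Str.split? "es_mortal(X)" "(" = some ["es_mortal", "X)"] from by decide] at hs1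
  injection hs1 with hs1; subst hs1
  rw [show PySem.List.pyGet? ["es_mortal", "X)"] 1 = some "X)" from by decide] at hg1
  injection hg1 with hg1; subst hg1
  rw [show PySem.Str.split? "X)" ")" = some ["X", ""] from by decide] at hs2
  injection hs2 with hs2; subst hs2
  rw [show PySem.List.pyGet? ["X", ""] 0 = some "X" from by decide] at hg2
  injection hg2 with hg2; subst hg2
  decide

-- ===== PORT B =====
-- one step of B's loop: Sum.inr v = ('done', v), Sum.inl q = ('next', q)
def paso (consulta : String) : String ⊕ Bool :=
  match hechos.get? consulta with
  | some (Sum.inl true) => Sum.inr true          -- valor is True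
  | some (Sum.inr valor) =>                      -- isinstance(valor, str)
      match PySem.Str.split? consulta "(" with
      | none => Sum.inr false                    -- unreachable: the separator "(" is nonempty
      | some partes1 =>
        match PySem.List.pyGet? partes1 1 with
        | none => Sum.inr false                  -- unreachable: Python IndexError
        | some parte =>
          match PySem.Str.split? parte ")" with
          | none => Sum.inr false                -- unreachable: the separator ")" is nonempty
          | some partes2 =>
            match PySem.List.pyGet? partes2 0 with
            | none => Sum.inr false              -- unreachable: split never yields an empty list
            | some var => Sum.inl (PySem.Str.replace valor "X" var)
  | some (Sum.inl false) => Sum.inr false        -- valor is neither True nor a str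
  | none => Sum.inr false                        -- consulta not in hechos

-- the step asks for another iteration only at "es_mortal(X)", moving to "es_humano(X)" (needed for termination)
theorem paso_inl (c c' : String) (h : paso c = Sum.inl c') :
    c = "es_mortal(X)" ∧ c' = "es_humano(X)" := by
  unfold paso at h
  rw [hechos_get?] at h
  split_ifs at h with hc1 hc2
  · subst hc2
    simp only [show PySem.Str.split? "es_mortal(X)" "(" = some ["es_mortal", "X)"] from by decide,
        show PySem.List.pyGet? ["es_mortal", "X)"] (1 : Int) = some "X)" from by decide,
        show PySem.Str.split? "X)" ")" = some ["X", ""] from by decide,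
        show PySem.List.pyGet? ["X", ""] (0 : Int) = some "X" from by decide] at h
    simp at h
    exact ⟨rfl, h.symm⟩

-- B's own termination measure (kept distinct from A's so the two well-founded definitions share no cached obligations)
def pvMuB (s : String) : Nat := if s = "es_mortal(X)" then 3 else 0

def consultar_alt (consulta : String) : Bool :=
  match hp : paso consulta with
  | Sum.inr valor => valor
  | Sum.inl siguiente => consultar_alt siguiente
termination_by pvMuB consulta
decreasing_by
  obtain ⟨hc, hn⟩ := paso_inl _ _ hp
  subst hc; subst hn
  decide

-- ===== PRECONDITION & SPEC =====
def Spec_consultar (consulta : String) (out : Bool) : Prop := out = consultar_alt consulta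
instance (consulta : String) (out : Bool) : Decidable (Spec_consultar consulta out) := by unfold Spec_consultar; infer_instance

-- ===== CLAIM (what is proved, stated in full; the proofs are below) =====
def Claim_equal_consultar : Prop := ∀ (consulta : String), Dom_consultar consulta → Spec_consultar consulta (consultar consulta)

-- ===== LEMMAS AND PROOFS =====

theorem get?_none_of_ne (c : String) (h1 : c ≠ "es_humano(alejandro)") (h2 : c ≠ "es_mortal(X)") :
    hechos.get? c = none := by
  rw [hechos_get?, if_neg (Ne.symm h1), if_neg (Ne.symm h2)]

theorem consultar_of_get?_none (c : String) (e : hechos.get? c = none) : consultar c = false := by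
  rw [consultar.eq_def]
  split <;> simp_all

theorem consultar_alt_of_get?_none (c : String) (e : hechos.get? c = none) : consultar_alt c = false := by
  rw [consultar_alt.eq_def]
  have hp : paso c = Sum.inr false := by unfold paso; rw [e]
  split <;> simp_all

theorem consultar_humano : consultar "es_humano(alejandro)" = true := by
  rw [consultar.eq_def]
  rfl

theorem consultar_alt_humano : consultar_alt "es_humano(alejandro)" = true := by
  rw [consultar_alt.eq_def]
  rfl

theorem consultar_mortal : consultar "es_mortal(X)" = false := by
  have e : consultar "es_humano(X)" = false :=
    consultar_of_get?_none _ (get?_none_of_ne _ (by decide) (by decide))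
  rw [consultar.eq_def]
  exact e

theorem consultar_alt_mortal : consultar_alt "es_mortal(X)" = false := by
  have e : consultar_alt "es_humano(X)" = false :=
    consultar_alt_of_get?_none _ (get?_none_of_ne _ (by decide) (by decide))
  rw [consultar_alt.eq_def]
  exact e

-- ===== VERDICT (by name: the statement is the Claim_ definition above) =====
theorem consultar_spec : Claim_equal_consultar := by
  intro c _
  unfold Spec_consultar
  by_cases h1 : c = "es_humano(alejandro)"
  · subst h1; rw [consultar_humano, consultar_alt_humano]
  · by_cases h2 : c = "es_mortal(X)"
    · subst h2; rw [consultar_mortal, consultar_alt_mortal]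
    · rw [consultar_of_get?_none c (get?_none_of_ne c h1 h2),
          consultar_alt_of_get?_none c (get?_none_of_ne c h1 h2)]
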